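-- pv_equiv track=rewrite | github.com/alpha-kwhn/Programmers | Level2/문자열 나누기.py | solution
-- ===== SOURCE A (Python) =====
-- def solution(s):
--     answer = 0
--     target = []
--     same = 0
--     diff = 0
--
--     for i in range(0, len(s)):
--         if len(target) == 0:
--             target.append(s[i])
--             same += 1
--         else:
--             if s[i] == target[0]:
--                 same += 1
--             else:
--                 diff += 1
--
--         if same == diff:
--             answer += 1
--             target = []
--
--     if len(target) != 0:
--         answer += 1
--
--     return answer
-- ===== SOURCE B (Python) =====
-- def solution(s):
--     if not s:
--         return 0
--     x = s[0]
--     bal = 0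
--     for i, c in enumerate(s):
--         bal += 1 if c == x else -1
--         if bal == 0:
--             return 1 + solution(s[i + 1:])
--     return 1
-- ===== Notes on version B (the rewrite author's own statement) =====
-- stated objective: simpler
-- what changed: Replaces A's single flat pass carrying global same/diff counters, a pending-target list and a post-loop fixup by a recursive decomposition: each call peels one segment with a single balance counter (+1 anchor, -1 other) and recurses on the remaining suffix slice, the trailing incomplete segment being the recursion's base case.
import Mathlib
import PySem

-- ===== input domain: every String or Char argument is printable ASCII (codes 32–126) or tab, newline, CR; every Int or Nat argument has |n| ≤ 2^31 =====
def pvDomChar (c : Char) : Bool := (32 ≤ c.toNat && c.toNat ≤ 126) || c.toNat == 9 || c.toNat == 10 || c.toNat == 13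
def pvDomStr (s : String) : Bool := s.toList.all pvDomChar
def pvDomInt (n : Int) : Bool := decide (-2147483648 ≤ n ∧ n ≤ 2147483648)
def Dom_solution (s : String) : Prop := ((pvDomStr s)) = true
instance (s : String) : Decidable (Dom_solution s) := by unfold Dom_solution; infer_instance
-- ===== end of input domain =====

-- B replaces A's flat pass (global same/diff counters + pending target + post-loop fixup) by a
-- recursion that peels one segment per call with a single balance counter (objective: simpler).

-- ===== PORT A =====
-- one iteration of A's for-loop body; state = (answer, target, same, diff)
def aStep (st : Int × List Char × Int × Int) (c : Char) : Int × List Char × Int × Int :=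
  match st with
  | (answer, target, same, diff) =>
    let (target, same, diff) :=
      match target with
      | [] => ([c], same + 1, diff)            -- target.append(s[i]); same += 1
      | t :: ts => if c = t then (t :: ts, same + 1, diff) else (t :: ts, same, diff + 1)
    if same = diff then (answer + 1, ([] : List Char), same, diff)
    else (answer, target, same, diff)

def solution (s : String) : Int :=
  let st := s.toList.foldl aStep (0, ([] : List Char), 0, 0)
  if st.2.1.length ≠ 0 then st.1 + 1 else st.1

-- ===== PORT B =====
-- B's for-loop over the string: update the balance; on bal = 0 return the suffix s[i+1:]
-- (the recursion continues there); none = the loop ran out (trailing incomplete segment).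
def altSplit (x : Char) (l : List Char) (bal : Int) : Option (List Char) :=
  match l with
  | [] => none
  | c :: rest =>
    let bal' := bal + (if c = x then 1 else -1)
    if bal' = 0 then some rest else altSplit x rest bal'

-- termination of B's recursion: the returned suffix is strictly shorter (cited by altGo)
theorem altSplit_lt (x : Char) : ∀ (l : List Char) (bal : Int) (r : List Char),
    altSplit x l bal = some r → r.length < l.length := by
  intro l
  induction l with
  | nil => intro bal r h; simp [altSplit] at h
  | cons c rest ih =>
    intro bal r h
    simp only [altSplit] at h
    split_ifs at h <;>
      first
        | (cases h; simp)
        | exact Nat.lt_trans (ih _ r h) (Nat.lt_succ_self _)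

def altGo : List Char → Int
  | [] => 0
  | x :: rest =>
    match hs : altSplit x (x :: rest) 0 with
    | some r => 1 + altGo r
    | none => 1
termination_by l => l.length
decreasing_by exact altSplit_lt x (x :: rest) 0 r hs

def solution_alt (s : String) : Int := altGo s.toList

-- ===== PRECONDITION & SPEC =====
def Spec_solution (s : String) (out : Int) : Prop := out = solution_alt s
instance (s : String) (out : Int) : Decidable (Spec_solution s out) := by unfold Spec_solution; infer_instance

-- ===== CLAIM (what is proved, stated in full; the proofs are below) =====
def Claim_equal_solution : Prop := ∀ (s : String), Dom_solution s → Spec_solution s (solution s)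

-- ===== LEMMAS AND PROOFS =====

-- A's post-loop fixup applied to a fold state
def aFinish (st : Int × List Char × Int × Int) : Int :=
  if st.2.1.length ≠ 0 then st.1 + 1 else st.1

-- what B contributes for the rest of one open segment (anchor x, balance s - d)
-- (segRest is only a proof-side name for the match inside altGo)
def segRest (x : Char) (l : List Char) (bal : Int) : Int :=
  match altSplit x l bal with
  | some r => 1 + altGo r
  | none => 1

theorem altGo_cons (x : Char) (rest : List Char) :
    altGo (x :: rest) = segRest x (x :: rest) 0 := by
  rw [altGo]
  split <;> simp [segRest, *]

-- Mutual invariant, by strong induction on the remaining list's length: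
-- (i) from a between-segments state (empty target, same = diff = S) A's fold finishes at answer + altGo l;
-- (ii) from a mid-segment state (target = [x], same = S + s, diff = S + d, s ≠ d) it finishes
--      at answer + segRest x l (s - d).
theorem invariant (n : Nat) : ∀ l : List Char, l.length ≤ n →
    (∀ answer S : Int, aFinish (l.foldl aStep (answer, ([] : List Char), S, S)) = answer + altGo l) ∧
    (∀ (x : Char) (answer S s d : Int), s ≠ d →
      aFinish (l.foldl aStep (answer, ([x] : List Char), S + s, S + d))
        = answer + segRest x l (s - d)) := by
  induction n with
  | zero =>
    intro l hl
    have : l = [] := List.eq_nil_of_length_eq_zero (Nat.le_zero.mp hl)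
    subst this
    refine ⟨fun answer S => by simp [aFinish, altGo],
            fun x answer S s d _ => by simp [aFinish, segRest, altSplit]⟩
  | succ n ih =>
    intro l hl
    match l with
    | [] =>
      refine ⟨fun answer S => by simp [aFinish, altGo],
              fun x answer S s d _ => by simp [aFinish, segRest, altSplit]⟩
    | c :: rest =>
      have hr : rest.length ≤ n := Nat.lt_succ_iff.mp (by simpa using hl)
      constructor
      · -- between segments: first char opens a new segment with anchor c
        intro answer S
        have h1 : aStep (answer, ([] : List Char), S, S) c
            = (answer, ([c] : List Char), S + 1, S) := by
          simp [aStep, show ¬ (S + 1 = S) from by omega]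
        have h2 := (ih rest hr).2 c answer S 1 0 (by norm_num)
        rw [show S + (0 : Int) = S from by ring] at h2
        rw [List.foldl_cons, h1, h2, altGo_cons]
        -- altSplit's first step on the anchor itself: bal' = 1 ≠ 0
        simp [segRest, altSplit]
      · -- mid segment with anchor x
        intro x answer S s d hsd
        by_cases hc : c = x
        · subst hc
          by_cases hend : s + 1 = d
          · -- same catches up with diff: segment closes
            have h1 : aStep (answer, ([c] : List Char), S + s, S + d) c
                = (answer + 1, ([] : List Char), S + s + 1, S + d) := by
              simp [aStep, show S + s + 1 = S + d from by omega]
            rw [List.foldl_cons, h1, show S + s + 1 = S + d from by omega,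
              (ih rest hr).1 (answer + 1) (S + d)]
            simp [segRest, altSplit, show s - d + 1 = 0 from by omega]
            ring
          · have h1 : aStep (answer, ([c] : List Char), S + s, S + d) c
                = (answer, ([c] : List Char), S + (s + 1), S + d) := by
              simp [aStep, show ¬ (S + s + 1 = S + d) from by omega]
              ring
            have h2 := (ih rest hr).2 c answer S (s + 1) d hend
            rw [List.foldl_cons, h1, h2]
            simp [segRest, altSplit, show ¬ (s - d + 1 = 0) from by omega,
              show s + 1 - d = s - d + 1 from by ring]
        · by_cases hend : s = d + 1
          · have h1 : aStep (answer, ([x] : List Char), S + s, S + d) c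
                = (answer + 1, ([] : List Char), S + s, S + d + 1) := by
              simp [aStep, hc, show S + s = S + d + 1 from by omega]
            rw [List.foldl_cons, h1, show S + s = S + d + 1 from by omega,
              (ih rest hr).1 (answer + 1) (S + d + 1)]
            simp [segRest, altSplit, hc, show s - d + -1 = 0 from by omega]
            ring
          · have h1 : aStep (answer, ([x] : List Char), S + s, S + d) c
                = (answer, ([x] : List Char), S + s, S + (d + 1)) := by
              simp [aStep, hc, show ¬ (S + s = S + d + 1) from by omega]
              ring
            have h2 := (ih rest hr).2 x answer S s (d + 1) hend
            rw [List.foldl_cons, h1, h2]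
            simp [segRest, altSplit, hc, show ¬ (s - d + -1 = 0) from by omega,
              show s - (d + 1) = s - d + -1 from by ring]

-- ===== VERDICT (by name: the statement is the Claim_ definition above) =====
theorem solution_spec : Claim_equal_solution := by
  intro s _
  show solution s = solution_alt s
  have h := ((invariant s.toList.length) s.toList le_rfl).1 0 0
  simpa [solution, solution_alt, aFinish] using h
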